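-- pv_equiv track=rewrite | github.com/ra1nb0rn/avain | src/core/scan_result_processor.py | _group_in
-- ===== SOURCE A (Python) =====
-- def _group_in(group: list, list_groups: list):
--     """
--     Check if there exists a group in the second list parameter
--     that contains all items in the given group (first list).
--
--     :param group: the group to check whether all its items are already
--     in a group contained in list_groups
--     :param list_groups: a list of item groups
--     :return: True if there is a group in list_groups that contains all
--     items in group, False otherwise
--     """
--
--     for l_group in list_groups:
--         group_in = True
--         # check if every item of group exists in l_group
--         for item in group:
--             if item not in l_group:
--                 group_in = False
--                 break
--         if group_in:
--             return True
--     return False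
-- ===== SOURCE B (Python) =====
-- def _group_in(group: list, list_groups: list):
--     # Column-wise candidate filtering: start with all groups as candidates and,
--     # for each item of `group`, keep only the candidate groups containing it.
--     candidates = list_groups
--     for item in group:
--         candidates = [g for g in candidates if item in g]
--     return bool(candidates)
-- ===== Notes on version B (the rewrite author's own statement) =====
-- stated objective: alternative
-- what changed: Replaces A's row-wise scan (per candidate group, test every item with early exit) by a column-wise candidate-filtering pass: start with all groups as candidates and filter the candidate list by one item at a time, returning whether any candidate survives.
import Mathlib
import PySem

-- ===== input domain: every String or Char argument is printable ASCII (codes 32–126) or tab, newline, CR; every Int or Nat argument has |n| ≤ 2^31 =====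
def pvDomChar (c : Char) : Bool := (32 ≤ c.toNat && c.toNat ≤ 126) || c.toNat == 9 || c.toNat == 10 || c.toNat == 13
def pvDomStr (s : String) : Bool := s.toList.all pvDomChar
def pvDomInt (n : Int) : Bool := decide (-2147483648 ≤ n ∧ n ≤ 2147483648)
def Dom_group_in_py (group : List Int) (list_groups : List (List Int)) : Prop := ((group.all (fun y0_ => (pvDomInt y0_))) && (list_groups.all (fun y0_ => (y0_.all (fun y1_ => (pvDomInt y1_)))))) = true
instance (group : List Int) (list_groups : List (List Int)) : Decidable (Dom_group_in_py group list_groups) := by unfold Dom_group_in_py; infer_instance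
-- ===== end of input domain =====

-- ===== PORT A =====
-- inner loop of A: `for item in group: if item not in l_group: group_in = False; break`
def groupInInner (group : List Int) (l_group : List Int) : Bool :=
  match group with
  | [] => true
  | item :: rest => if l_group.contains item then groupInInner rest l_group else false

def group_in_py (group : List Int) (list_groups : List (List Int)) : Bool :=
  match list_groups with
  | [] => false
  | l_group :: rest => if groupInInner group l_group then true else group_in_py group rest

-- ===== PORT B =====
-- B: column-wise candidate filtering (alternative decomposition, same cost)
def group_in_py_alt (group : List Int) (list_groups : List (List Int)) : Bool :=
  let candidates :=
    group.foldl (fun cands item => cands.filter (fun g => g.contains item)) list_groups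
  !candidates.isEmpty

-- ===== PRECONDITION & SPEC =====
def Spec_group_in_py (group : List Int) (list_groups : List (List Int)) (out : Bool) : Prop := out = group_in_py_alt group list_groups
instance (group : List Int) (list_groups : List (List Int)) (out : Bool) : Decidable (Spec_group_in_py group list_groups out) := by unfold Spec_group_in_py; infer_instance

-- ===== CLAIM (what is proved, stated in full; the proofs are below) =====
def Claim_equal_group_in_py : Prop := ∀ (group : List Int) (list_groups : List (List Int)), Dom_group_in_py group list_groups → Spec_group_in_py group list_groups (group_in_py group list_groups)

-- ===== LEMMAS AND PROOFS =====

-- ===== VERDICT (by name: the statement is the Claim_ definition above) =====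
lemma groupInInner_eq_all (group l_group : List Int) :
    groupInInner group l_group = group.all (fun item => l_group.contains item) := by
  induction group with
  | nil => rfl
  | cons item rest ih =>
    simp [groupInInner, List.all_cons, ih]

lemma group_in_py_eq_any (group : List Int) (list_groups : List (List Int)) :
    group_in_py group list_groups = list_groups.any (fun g => groupInInner group g) := by
  induction list_groups with
  | nil => rfl
  | cons g rest ih =>
    simp [group_in_py, List.any_cons, ih]

lemma foldl_filter_eq_filter_all (group : List Int) (init : List (List Int)) :
    group.foldl (fun cands item => cands.filter (fun g => g.contains item)) init
      = init.filter (fun g => group.all (fun item => g.contains item)) := by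
  induction group generalizing init with
  | nil => simp
  | cons item rest ih =>
    rw [List.foldl_cons, ih, List.filter_filter]
    apply List.filter_congr
    intro g _
    simp [List.all_cons, Bool.and_comm]

lemma any_eq_not_isEmpty_filter (l : List (List Int)) (q : List Int → Bool) :
    l.any q = !(l.filter q).isEmpty := by
  induction l with
  | nil => rfl
  | cons g rest ih =>
    by_cases h : q g = true <;> simp [List.any_cons, List.filter_cons, h, ih]

theorem group_in_py_spec : Claim_equal_group_in_py := by
  intro group list_groups _
  unfold Spec_group_in_py group_in_py_alt
  rw [group_in_py_eq_any, foldl_filter_eq_filter_all, ← any_eq_not_isEmpty_filter]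
  congr 1
  funext g
  exact groupInInner_eq_all group g
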